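-- pv_equiv track=rewrite | github.com/DonotDonut/UWB-Hackathon-2026 | src/machine_learning/eclat.py | filter_maximal_patterns
-- ===== SOURCE A (Python) =====
-- def filter_maximal_patterns(frequent_itemsets):
--     itemsets = list(frequent_itemsets.keys())
--     maximal_itemsets = {}
--
--     for itemset in itemsets:
--         itemset_set = set(itemset)
--
--         is_subset = False
--         for other_itemset in itemsets:
--             other_set = set(other_itemset)
--
--             if itemset_set < other_set:
--                 is_subset = True
--                 break
--
--         if not is_subset:
--             maximal_itemsets[itemset] = frequent_itemsets[itemset]
--
--     return maximal_itemsets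
-- ===== SOURCE B (Python) =====
-- def filter_maximal_patterns(frequent_itemsets):
--     def subsets(c):
--         # all sub-tuples of c (c sorted, duplicate-free)
--         if not c:
--             return [()]
--         rest = subsets(c[1:])
--         return [(c[0],) + t for t in rest] + rest
--
--     nonmax = set()
--     for key in frequent_itemsets:
--         c = tuple(sorted(set(key)))
--         for s in subsets(c):
--             if s != c:
--                 nonmax.add(s)
--
--     return {k: v for k, v in frequent_itemsets.items()
--             if tuple(sorted(set(k))) not in nonmax}
-- ===== Notes on version B (the rewrite author's own statement) =====
-- stated objective: faster
-- what changed: Instead of scanning all other itemsets for each itemset (quadratic pairwise proper-subset tests), B makes one pass that enumerates each itemset's proper subsets (canonical sorted tuples) into a hash set and then keeps exactly the entries whose canonical form was never marked.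
import Mathlib
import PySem

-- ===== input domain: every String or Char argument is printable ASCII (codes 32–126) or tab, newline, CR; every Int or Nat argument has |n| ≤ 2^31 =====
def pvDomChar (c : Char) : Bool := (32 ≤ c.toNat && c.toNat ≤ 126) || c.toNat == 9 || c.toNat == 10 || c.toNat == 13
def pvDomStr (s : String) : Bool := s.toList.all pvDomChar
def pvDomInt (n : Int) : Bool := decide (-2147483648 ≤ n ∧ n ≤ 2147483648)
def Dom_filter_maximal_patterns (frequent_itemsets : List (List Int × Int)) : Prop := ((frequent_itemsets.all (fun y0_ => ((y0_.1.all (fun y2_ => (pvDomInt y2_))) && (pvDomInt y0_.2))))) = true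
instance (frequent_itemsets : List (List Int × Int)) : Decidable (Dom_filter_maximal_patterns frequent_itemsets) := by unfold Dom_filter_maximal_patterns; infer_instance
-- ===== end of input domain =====

-- B replaces A's pairwise proper-subset scan (for every itemset, scan all others) by one
-- pass that marks every proper subset of each itemset's element set as non-maximal, then
-- keeps the unmarked entries; the RETURN values are proved equal on dict inputs.

-- ===== PORT A =====
-- Python's `s < t` on sets (proper subset): subset and not equal
def pvProperSubset (s t : PySem.Set Int) : Bool :=
  PySem.Set.issubset s t && !PySem.Set.equal s t

def filter_maximal_patterns (frequent_itemsets : List (List Int × Int)) : List (List Int × Int) :=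
  let itemsets : List (List Int) := (PySem.Dict.mk frequent_itemsets).keys
  let maximal_itemsets : PySem.Dict (List Int) Int :=
    itemsets.foldl (fun m itemset =>
      let itemset_set : PySem.Set Int := PySem.Set.ofList itemset
      -- flag-and-break inner loop: `any` stops at the first proper superset, like the break
      let is_subset : Bool := itemsets.any (fun other_itemset =>
        let other_set : PySem.Set Int := PySem.Set.ofList other_itemset
        pvProperSubset itemset_set other_set)
      if !is_subset then
        -- frequent_itemsets[itemset]: the key is always present, so getD's default is never used
        m.insert itemset ((PySem.Dict.mk frequent_itemsets).getD itemset 0)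
      else m) PySem.Dict.empty
  maximal_itemsets.items

-- ===== PORT B =====
-- all sub-tuples of c (Source B's recursive `subsets`)
def pvSubsets (c : List Int) : List (List Int) :=
  match c with
  | [] => [[]]
  | x :: xs =>
    let rest := pvSubsets xs
    rest.map (fun t => x :: t) ++ rest

-- tuple(sorted(set(key)))
def pvCanon (key : List Int) : List Int :=
  PySem.List.sorted (PySem.Set.ofList key) (fun x => x)

def filter_maximal_patterns_alt (frequent_itemsets : List (List Int × Int)) : List (List Int × Int) :=
  let nonmax : PySem.Set (List Int) :=
    frequent_itemsets.foldl (fun nm kv =>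
      let c := pvCanon kv.1
      (pvSubsets c).foldl (fun nm s => if s ≠ c then PySem.Set.add nm s else nm) nm)
      PySem.Set.empty
  (frequent_itemsets.foldl (fun (d : PySem.Dict (List Int) Int) kv =>
      if !(PySem.Set.contains nonmax (pvCanon kv.1)) then d.insert kv.1 kv.2 else d)
      PySem.Dict.empty).items

-- ===== PRECONDITION & SPEC =====
-- Pre_ requires pairwise-distinct keys — true of every Python dict; it only excludes
-- association lists that do not represent a dict (no Python input is excluded).
def Pre_filter_maximal_patterns (frequent_itemsets : List (List Int × Int)) : Prop :=
  (frequent_itemsets.map (·.1)).Nodup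
instance (frequent_itemsets : List (List Int × Int)) : Decidable (Pre_filter_maximal_patterns frequent_itemsets) := by unfold Pre_filter_maximal_patterns; infer_instance

def pvWitness_filter_maximal_patterns : (List (List Int × Int)) := [([1], 2), ([1, 2], 3)]

def Spec_filter_maximal_patterns (frequent_itemsets : List (List Int × Int)) (out : List (List Int × Int)) : Prop := out = filter_maximal_patterns_alt frequent_itemsets
instance (frequent_itemsets : List (List Int × Int)) (out : List (List Int × Int)) : Decidable (Spec_filter_maximal_patterns frequent_itemsets out) := by unfold Spec_filter_maximal_patterns; infer_instance

-- ===== CLAIM (what is proved, stated in full; the proofs are below) =====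
def Claim_equal_filter_maximal_patterns : Prop := ∀ (frequent_itemsets : List (List Int × Int)), Dom_filter_maximal_patterns frequent_itemsets → Pre_filter_maximal_patterns frequent_itemsets → Spec_filter_maximal_patterns frequent_itemsets (filter_maximal_patterns frequent_itemsets)

-- ===== LEMMAS AND PROOFS =====

-- A's keep-condition, as one predicate on a key
def pvCondA (fi : List (List Int × Int)) (k : List Int) : Bool :=
  !((fi.map (·.1)).any (fun other =>
      pvProperSubset (PySem.Set.ofList k) (PySem.Set.ofList other)))

-- B's nonmax set (the first loop of filter_maximal_patterns_alt)
def pvNonmaxOf (fi : List (List Int × Int)) : PySem.Set (List Int) :=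
  fi.foldl (fun nm kv =>
    (pvSubsets (pvCanon kv.1)).foldl
      (fun nm s => if s ≠ pvCanon kv.1 then PySem.Set.add nm s else nm) nm)
    PySem.Set.empty

-- B's keep-condition, as one predicate on a key
def pvCondB (fi : List (List Int × Int)) (k : List Int) : Bool :=
  !(PySem.Set.contains (pvNonmaxOf fi) (pvCanon k))

theorem mem_pvSubsets (c s : List Int) : s ∈ pvSubsets c ↔ s.Sublist c := by
  induction c generalizing s with
  | nil => simp [pvSubsets]
  | cons x xs ih =>
    simp only [pvSubsets, List.mem_append, List.mem_map, List.sublist_cons_iff, ih]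
    constructor
    · rintro (⟨t, ht, rfl⟩ | h)
      · exact Or.inr ⟨t, rfl, ht⟩
      · exact Or.inl h
    · rintro (h | ⟨r, rfl, hr⟩)
      · exact Or.inr h
      · exact Or.inl ⟨r, hr, rfl⟩

theorem pvCanon_pairwise (key : List Int) : (pvCanon key).Pairwise (· < ·) :=
  PySem.List.sorted_ofList_pairwise_lt key

theorem pvCanon_nodup (key : List Int) : (pvCanon key).Nodup :=
  (pvCanon_pairwise key).nodup

theorem mem_pvCanon (key : List Int) (a : Int) : a ∈ pvCanon key ↔ a ∈ key := by
  simp [pvCanon, PySem.List.mem_sorted, PySem.Set.mem_ofList]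

theorem pvCanon_eq_iff (x y : List Int) :
    pvCanon x = pvCanon y ↔ (∀ a : Int, a ∈ x ↔ a ∈ y) := by
  constructor
  · intro h a
    rw [← mem_pvCanon x a, ← mem_pvCanon y a, h]
  · intro h
    have hperm : (pvCanon x).Perm (pvCanon y) := by
      rw [List.perm_ext_iff_of_nodup (pvCanon_nodup x) (pvCanon_nodup y)]
      intro a
      rw [mem_pvCanon, mem_pvCanon]
      exact h a
    exact hperm.eq_of_pairwise
      (fun a b _ _ hab hba => le_antisymm hab.le hba.le)
      (pvCanon_pairwise x) (pvCanon_pairwise y)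

theorem pvCanon_sublist_iff (x y : List Int) :
    (pvCanon x).Sublist (pvCanon y) ↔ (∀ a ∈ x, a ∈ y) := by
  constructor
  · intro h a ha
    exact (mem_pvCanon y a).mp (h.subset ((mem_pvCanon x a).mpr ha))
  · intro h
    refine List.sublist_of_subperm_of_pairwise
      (List.Nodup.subperm (pvCanon_nodup x) ?_) (pvCanon_pairwise x) (pvCanon_pairwise y)
    intro a ha
    exact (mem_pvCanon y a).mpr (h a ((mem_pvCanon x a).mp ha))

-- A's proper-subset test, as a proposition about memberships
theorem pvProperSubset_iff (x y : List Int) :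
    pvProperSubset (PySem.Set.ofList x) (PySem.Set.ofList y) = true ↔
      ((∀ a ∈ x, a ∈ y) ∧ ¬ (∀ a : Int, a ∈ x ↔ a ∈ y)) := by
  simp only [pvProperSubset, Bool.and_eq_true, Bool.not_eq_true', Bool.eq_false_iff, ne_eq,
    PySem.Set.issubset_iff, PySem.Set.equal_iff, PySem.Set.mem_ofList]

-- B's mark "canon x is a proper subset of canon y", as the same proposition
theorem pvMark_iff (x y : List Int) :
    (pvCanon x ∈ pvSubsets (pvCanon y) ∧ pvCanon x ≠ pvCanon y) ↔
      ((∀ a ∈ x, a ∈ y) ∧ ¬ (∀ a : Int, a ∈ x ↔ a ∈ y)) := by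
  rw [mem_pvSubsets, pvCanon_sublist_iff, ne_eq, pvCanon_eq_iff]

-- membership through B's inner marking loop
theorem mem_inner_fold (l : List (List Int)) (c : List Int) (nm : PySem.Set (List Int)) (y : List Int) :
    y ∈ l.foldl (fun nm s => if s ≠ c then PySem.Set.add nm s else nm) nm ↔
      y ∈ nm ∨ (y ∈ l ∧ y ≠ c) := by
  induction l generalizing nm with
  | nil => simp
  | cons s t ih =>
    simp only [List.foldl_cons, ih, List.mem_cons]
    by_cases hs : s = c
    · subst hs
      simp only [ne_eq, not_true_eq_false, if_false]
      constructor
      · rintro (h | h) <;> tauto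
      · rintro (h | ⟨(rfl | h), hy⟩) <;> tauto
    · simp only [if_pos (by exact hs : s ≠ c), PySem.Set.mem_add]
      constructor
      · rintro ((h | rfl) | h) <;> tauto
      · rintro (h | ⟨(rfl | h), hy⟩) <;> tauto

-- membership in B's nonmax set
theorem mem_nonmax_fold (fi : List (List Int × Int)) (nm : PySem.Set (List Int)) (y : List Int) :
    y ∈ fi.foldl (fun nm kv =>
        (pvSubsets (pvCanon kv.1)).foldl
          (fun nm s => if s ≠ pvCanon kv.1 then PySem.Set.add nm s else nm) nm) nm ↔
      y ∈ nm ∨ ∃ kv ∈ fi, y ∈ pvSubsets (pvCanon kv.1) ∧ y ≠ pvCanon kv.1 := by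
  induction fi generalizing nm with
  | nil => simp
  | cons kv t ih =>
    simp only [List.foldl_cons, ih, mem_inner_fold, List.mem_cons]
    constructor
    · rintro ((h | h) | ⟨kw, hm, h⟩)
      · exact Or.inl h
      · exact Or.inr ⟨kv, Or.inl rfl, h⟩
      · exact Or.inr ⟨kw, Or.inr hm, h⟩
    · rintro (h | ⟨kw, (rfl | hm), h⟩)
      · exact Or.inl (Or.inl h)
      · exact Or.inl (Or.inr h)
      · exact Or.inr ⟨kw, hm, h⟩

-- the two keep-conditions agree on every key
theorem pvCond_agree (fi : List (List Int × Int)) (x : List Int) :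
    pvCondA fi x = pvCondB fi x := by
  unfold pvCondA pvCondB
  congr 1
  rw [Bool.eq_iff_iff, List.any_eq_true, PySem.Set.contains_iff]
  unfold pvNonmaxOf
  rw [mem_nonmax_fold]
  simp only [PySem.Set.empty, List.not_mem_nil, false_or, List.mem_map]
  constructor
  · rintro ⟨k, ⟨kv, hm, rfl⟩, h⟩
    exact ⟨kv, hm, (pvMark_iff x kv.1).mpr ((pvProperSubset_iff x kv.1).mp h)⟩
  · rintro ⟨kv, hm, h⟩
    exact ⟨kv.1, ⟨kv, hm, rfl⟩, (pvProperSubset_iff x kv.1).mpr ((pvMark_iff x kv.1).mp h)⟩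

theorem map_eq_self_forall {α : Type} (l : List α) (g : α → α) (h : l.map g = l) :
    ∀ x ∈ l, g x = x := by
  induction l with
  | nil => simp
  | cons a t ih =>
    simp only [List.map_cons, List.cons.injEq] at h
    intro x hx
    rcases List.mem_cons.mp hx with rfl | hx'
    · exact h.1
    · exact ih h.2 x hx'

-- lookup of a present key in a duplicate-free dict is its paired value
theorem getD_eq_snd (fi : List (List Int × Int)) (hpre : (fi.map (·.1)).Nodup) :
    ∀ kv ∈ fi, (PySem.Dict.mk fi).getD kv.1 0 = kv.2 := by
  have hitems := PySem.Dict.items_eq_map_keys (PySem.Dict.mk fi)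
    (by simpa [PySem.Dict.keys] using hpre) 0
  simp only [PySem.Dict.keys, List.map_map] at hitems
  have hall := map_eq_self_forall fi _ hitems.symm
  intro kv hm
  exact congrArg Prod.snd (hall kv hm)

theorem filter_maximal_patterns_eq_filter (fi : List (List Int × Int))
    (hpre : (fi.map (·.1)).Nodup) :
    filter_maximal_patterns fi = fi.filter (fun kv => pvCondA fi kv.1) := by
  have h1 : filter_maximal_patterns fi =
      (((fi.map (·.1)).filter (fun k => pvCondA fi k)).foldl
        (fun (m : PySem.Dict (List Int) Int) k =>
          m.insert k ((PySem.Dict.mk fi).getD k 0)) PySem.Dict.empty).items :=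
    congrArg PySem.Dict.items
      (List.foldl_filter (p := fun k => pvCondA fi k)
        (f := fun (m : PySem.Dict (List Int) Int) k =>
          m.insert k ((PySem.Dict.mk fi).getD k 0))
        (l := fi.map (fun kv : List Int × Int => kv.1)) (init := PySem.Dict.empty)).symm
  have h2 : (((fi.map (·.1)).filter (fun k => pvCondA fi k)).foldl
        (fun (m : PySem.Dict (List Int) Int) k =>
          m.insert k ((PySem.Dict.mk fi).getD k 0)) PySem.Dict.empty).items =
      ((fi.map (·.1)).filter (fun k => pvCondA fi k)).map
        (fun k => (k, (PySem.Dict.mk fi).getD k 0)) :=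
    PySem.Dict.items_foldl_insert_fresh _ (fun k => k)
      (fun k => (PySem.Dict.mk fi).getD k 0) PySem.Dict.empty
      (fun _ _ => rfl) (by simpa using hpre.filter _)
  have h3 : ((fi.map (·.1)).filter (fun k => pvCondA fi k)).map
        (fun k => (k, (PySem.Dict.mk fi).getD k 0)) =
      fi.filter (fun kv => pvCondA fi kv.1) := by
    rw [List.filter_map, List.map_map]
    have hpt : ∀ kv ∈ fi.filter ((fun k => pvCondA fi k) ∘ (·.1)),
        ((fun k => (k, (PySem.Dict.mk fi).getD k 0)) ∘ (·.1)) kv = kv := by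
      intro kv hm
      have hfi : kv ∈ fi := List.mem_of_mem_filter hm
      have hv := getD_eq_snd fi hpre kv hfi
      simp only [Function.comp_apply, hv]
    rw [List.map_congr_left hpt, List.map_id']
    rfl
  exact h1.trans (h2.trans h3)

theorem filter_maximal_patterns_alt_eq_filter (fi : List (List Int × Int))
    (hpre : (fi.map (·.1)).Nodup) :
    filter_maximal_patterns_alt fi = fi.filter (fun kv => pvCondB fi kv.1) := by
  have hsub : ((fi.filter (fun kv => pvCondB fi kv.1)).map (fun kv : List Int × Int => kv.1)).Sublist
      (fi.map (fun kv : List Int × Int => kv.1)) :=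
    List.Sublist.map _ List.filter_sublist
  have hnodup : ((fi.filter (fun kv => pvCondB fi kv.1)).map (fun kv : List Int × Int => kv.1)).Nodup :=
    List.Nodup.sublist hsub hpre
  have h1 : filter_maximal_patterns_alt fi =
      ((fi.filter (fun kv => pvCondB fi kv.1)).foldl
        (fun (d : PySem.Dict (List Int) Int) kv => d.insert kv.1 kv.2)
        PySem.Dict.empty).items :=
    congrArg PySem.Dict.items
      (List.foldl_filter (p := fun kv : List Int × Int => pvCondB fi kv.1)
        (f := fun (d : PySem.Dict (List Int) Int) (kv : List Int × Int) => d.insert kv.1 kv.2)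
        (l := fi) (init := PySem.Dict.empty)).symm
  have h2 : ((fi.filter (fun kv => pvCondB fi kv.1)).foldl
        (fun (d : PySem.Dict (List Int) Int) kv => d.insert kv.1 kv.2)
        PySem.Dict.empty).items =
      (fi.filter (fun kv => pvCondB fi kv.1)).map (fun kv => (kv.1, kv.2)) :=
    PySem.Dict.items_foldl_insert_fresh _ (fun kv : List Int × Int => kv.1)
      (fun kv : List Int × Int => kv.2) PySem.Dict.empty
      (fun _ _ => rfl) hnodup
  have h3 : (fi.filter (fun kv => pvCondB fi kv.1)).map (fun kv => (kv.1, kv.2)) =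
      fi.filter (fun kv => pvCondB fi kv.1) := by
    rw [show (fun kv : List Int × Int => (kv.1, kv.2)) = id from rfl, List.map_id]
  exact h1.trans (h2.trans h3)

-- ===== VERDICT (by name: the statement is the Claim_ definition above) =====
theorem filter_maximal_patterns_spec : Claim_equal_filter_maximal_patterns := by
  intro fi _hdom hpre
  unfold Spec_filter_maximal_patterns
  rw [filter_maximal_patterns_eq_filter fi hpre,
    filter_maximal_patterns_alt_eq_filter fi hpre]
  exact List.filter_congr (fun kv _ => pvCond_agree fi kv.1)
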